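-- pv_equiv track=rewrite | github.com/Nik-Rian/Evi-Lasio | tradutor.py | replace_operators
-- ===== SOURCE A (Python) =====
-- def replace_operators(condition):
--     replacements = {
--         'Neh?': '!=',
--         'meh?': '<',
--         'Meh?': '>',
--         'eh?': '=='
--     }
--
--     for custom_op, c_op in replacements.items():
--         condition = condition.replace(custom_op, c_op)
--
--     return condition
-- ===== SOURCE B (Python) =====
-- def replace_operators(condition):
--     tokens = [('Neh?', '!='), ('meh?', '<'), ('Meh?', '>'), ('eh?', '==')]
--     out = []
--     i = 0
--     n = len(condition)
--     while i < n:
--         for tok, op in tokens: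
--             if condition.startswith(tok, i):
--                 out.append(op)
--                 i += len(tok)
--                 break
--         else:
--             out.append(condition[i])
--             i += 1
--     return ''.join(out)
-- ===== Notes on version B (the rewrite author's own statement) =====
-- stated objective: alternative
-- what changed: Replaces the four sequential full-string .replace sweeps with one left-to-right scan that matches the token table at each position and emits the mapped operator or the single character.
import Mathlib
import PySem

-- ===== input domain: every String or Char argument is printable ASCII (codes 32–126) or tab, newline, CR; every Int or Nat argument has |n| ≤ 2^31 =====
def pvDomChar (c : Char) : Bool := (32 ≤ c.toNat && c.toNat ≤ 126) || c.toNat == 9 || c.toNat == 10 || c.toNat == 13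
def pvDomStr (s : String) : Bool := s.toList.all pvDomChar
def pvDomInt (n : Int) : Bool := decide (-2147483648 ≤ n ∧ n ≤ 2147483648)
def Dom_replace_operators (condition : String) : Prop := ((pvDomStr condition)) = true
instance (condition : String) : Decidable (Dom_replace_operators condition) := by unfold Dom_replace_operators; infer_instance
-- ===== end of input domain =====

set_option maxRecDepth 8192


-- B replaces A's four sequential full-string .replace sweeps with one left-to-right scan
-- that tries the fixed token table at each position (alternative decomposition, same result).

-- ===== PORT A =====
-- A builds a dict of replacements and applies condition.replace for each item in order.
def replace_operators (condition : String) : String :=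
  let replacements : PySem.Dict String String :=
    PySem.Dict.ofList [("Neh?", "!="), ("meh?", "<"), ("Meh?", ">"), ("eh?", "==")]
  replacements.items.foldl (fun cond p => PySem.Str.replace cond p.1 p.2) condition

-- ===== PORT B =====
-- B scans once: at each position try the tokens in table order (startswith), emit the
-- mapped operator and skip the token, else emit the character and advance by one.
def pvScan : List Char → List Char
  | [] => []
  | c :: t =>
    if List.isPrefixOf ['N','e','h','?'] (c :: t) then '!' :: '=' :: pvScan (t.drop 3)
    else if List.isPrefixOf ['m','e','h','?'] (c :: t) then '<' :: pvScan (t.drop 3)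
    else if List.isPrefixOf ['M','e','h','?'] (c :: t) then '>' :: pvScan (t.drop 3)
    else if List.isPrefixOf ['e','h','?'] (c :: t) then '=' :: '=' :: pvScan (t.drop 2)
    else c :: pvScan t
termination_by l => l.length
decreasing_by all_goals simp [List.length_drop]

def replace_operators_alt (condition : String) : String :=
  String.ofList (pvScan condition.toList)

-- ===== PRECONDITION & SPEC =====
def Spec_replace_operators (condition : String) (out : String) : Prop := out = replace_operators_alt condition
instance (condition : String) (out : String) : Decidable (Spec_replace_operators condition out) := by unfold Spec_replace_operators; infer_instance

-- ===== CLAIM (what is proved, stated in full; the proofs are below) =====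
def Claim_equal_replace_operators : Prop := ∀ (condition : String), Dom_replace_operators condition → Spec_replace_operators condition (replace_operators condition)

-- ===== LEMMAS AND PROOFS =====

-- Structural form of one .replace sweep (reference for PySem.Chars.replace).
def pvSweep (tok rep : List Char) : List Char → List Char
  | [] => []
  | c :: t =>
    if tok.isPrefixOf (c :: t) then rep ++ pvSweep tok rep (t.drop (tok.length - 1))
    else c :: pvSweep tok rep t
termination_by l => l.length
decreasing_by all_goals simp [List.length_drop]

theorem pvGo_eq_sweep (tok rep : List Char) (htok : tok ≠ []) :
    ∀ (fuel : Nat) (l acc : List Char), l.length ≤ fuel →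
      PySem.Chars.replace.go tok rep fuel l acc = acc.reverse ++ pvSweep tok rep l := by
  intro fuel
  induction fuel with
  | zero =>
    intro l acc hl
    have : l = [] := List.eq_nil_of_length_eq_zero (Nat.le_zero.mp hl)
    subst this
    simp [PySem.Chars.replace.go, pvSweep]
  | succ n ih =>
    intro l acc hl
    cases l with
    | nil => simp [PySem.Chars.replace.go, pvSweep]
    | cons c t =>
      rw [PySem.Chars.replace.go]
      by_cases hp : tok.isPrefixOf (c :: t) = true
      · rw [if_pos hp]
        have hlen : 1 ≤ tok.length := by
          cases tok with
          | nil => exact absurd rfl htok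
          | cons a b => simp
        have hdrop : (c :: t).drop tok.length = t.drop (tok.length - 1) := by
          cases tok with
          | nil => exact absurd rfl htok
          | cons a b => simp
        have hle : ((c :: t).drop tok.length).length ≤ n := by
          simp only [List.length_drop, List.length_cons] at *
          omega
        rw [ih _ _ hle, hdrop]
        simp [pvSweep, hp]
      · rw [if_neg hp]
        have : t.length ≤ n := by simpa using Nat.le_of_succ_le_succ hl
        rw [ih _ _ this]
        simp [pvSweep, hp]

theorem pvReplace_eq_sweep (tok rep l : List Char) (htok : tok ≠ []) :
    PySem.Chars.replace l tok rep = pvSweep tok rep l := by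
  rw [PySem.Chars.replace]
  rw [if_neg (by simpa using htok)]
  simpa using pvGo_eq_sweep tok rep htok l.length l [] le_rfl

-- Prefix preservation: a sweep whose token starts with a char outside q and whose
-- (nonempty) replacement shares no char with q neither creates nor destroys a q-prefix.
theorem pvSweep_prefix_iff (tok rep : List Char) (htok : tok ≠ []) (hrep : rep ≠ []) :
    ∀ (n : Nat) (x q : List Char), x.length ≤ n → (∀ c ∈ q, c ∉ rep) → (∀ c ∈ q, tok.head? ≠ some c) →
      (q <+: pvSweep tok rep x ↔ q <+: x) := by
  intro n
  induction n with
  | zero =>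
    intro x q hx hq1 hq2
    have : x = [] := List.eq_nil_of_length_eq_zero (Nat.le_zero.mp hx)
    subst this
    simp [pvSweep]
  | succ m ih =>
  intro x q hx hq1 hq2
  cases x with
  | nil => simp [pvSweep]
  | cons c t =>
    by_cases hp : tok.isPrefixOf (c :: t) = true
    · rw [pvSweep, if_pos hp]
      cases q with
      | nil => simp
      | cons d q' =>
        obtain ⟨e, rep', rfl⟩ : ∃ e rep', rep = e :: rep' := by
          cases rep with
          | nil => exact absurd rfl hrep
          | cons e rep' => exact ⟨e, rep', rfl⟩
        obtain ⟨a, tok', rfl⟩ : ∃ a tok', tok = a :: tok' := by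
          cases tok with
          | nil => exact absurd rfl htok
          | cons a tok' => exact ⟨a, tok', rfl⟩
        have hac : a = c := by
          have := (List.isPrefixOf_iff_prefix).mp hp
          rcases this with ⟨s, hs⟩
          injection hs
        constructor
        · intro h
          rcases h with ⟨s, hs⟩
          injection hs with h1 _
          exact absurd (h1 ▸ List.mem_cons_self) (hq1 d List.mem_cons_self)
        · intro h
          rcases h with ⟨s, hs⟩
          injection hs with h1 _
          exact absurd (by simp [hac, h1]) (hq2 d List.mem_cons_self)
    · rw [pvSweep, if_neg hp]
      cases q with
      | nil => simp
      | cons d q' =>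
        have iht := ih t q' (by simp at hx; omega)
          (fun c hc => hq1 c (List.mem_cons_of_mem _ hc))
          (fun c hc => hq2 c (List.mem_cons_of_mem _ hc))
        simp only [List.cons_prefix_cons]
        rw [iht]

-- ===== the four concrete sweeps =====

theorem pvChain_eq_scan_fuel : ∀ (n : Nat) (l : List Char), l.length ≤ n →
    pvSweep ['e','h','?'] ['=','='] (pvSweep ['M','e','h','?'] ['>']
      (pvSweep ['m','e','h','?'] ['<'] (pvSweep ['N','e','h','?'] ['!','='] l))) = pvScan l := by
  intro n
  induction n with
  | zero =>
    intro l hl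
    have : l = [] := List.eq_nil_of_length_eq_zero (Nat.le_zero.mp hl)
    subst this
    simp [pvSweep, pvScan]
  | succ m ih =>
  intro l hl
  cases l with
  | nil => simp [pvSweep, pvScan]
  | cons c t =>
    have IH : ∀ t' : List Char, t'.length ≤ t.length →
        pvSweep ['e','h','?'] ['=','='] (pvSweep ['M','e','h','?'] ['>']
          (pvSweep ['m','e','h','?'] ['<'] (pvSweep ['N','e','h','?'] ['!','='] t'))) = pvScan t' := by
      intro t' h
      apply ih
      simp at hl
      omega
    by_cases h1 : List.isPrefixOf ['N','e','h','?'] (c :: t) = true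
    · obtain ⟨t', ht⟩ : ∃ t', c :: t = 'N' :: 'e' :: 'h' :: '?' :: t' := by
        rcases (List.isPrefixOf_iff_prefix).mp h1 with ⟨s, hs⟩
        exact ⟨s, hs.symm⟩
      injection ht with hc ht2
      subst hc; subst ht2
      rw [pvScan, if_pos h1]
      simp [pvSweep]
      exact IH _ (by simp; omega)
    · by_cases h2 : List.isPrefixOf ['m','e','h','?'] (c :: t) = true
      · obtain ⟨t', ht⟩ : ∃ t', c :: t = 'm' :: 'e' :: 'h' :: '?' :: t' := by
          rcases (List.isPrefixOf_iff_prefix).mp h2 with ⟨s, hs⟩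
          exact ⟨s, hs.symm⟩
        injection ht with hc ht2
        subst hc; subst ht2
        rw [pvScan, if_neg h1, if_pos h2]
        simp [pvSweep]
        exact IH _ (by simp; omega)
      · by_cases h3 : List.isPrefixOf ['M','e','h','?'] (c :: t) = true
        · obtain ⟨t', ht⟩ : ∃ t', c :: t = 'M' :: 'e' :: 'h' :: '?' :: t' := by
            rcases (List.isPrefixOf_iff_prefix).mp h3 with ⟨s, hs⟩
            exact ⟨s, hs.symm⟩
          injection ht with hc ht2
          subst hc; subst ht2
          rw [pvScan, if_neg h1, if_neg h2, if_pos h3]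
          simp [pvSweep]
          exact IH _ (by simp; omega)
        · by_cases h4 : List.isPrefixOf ['e','h','?'] (c :: t) = true
          · obtain ⟨t', ht⟩ : ∃ t', c :: t = 'e' :: 'h' :: '?' :: t' := by
              rcases (List.isPrefixOf_iff_prefix).mp h4 with ⟨s, hs⟩
              exact ⟨s, hs.symm⟩
            injection ht with hc ht2
            subst hc; subst ht2
            rw [pvScan, if_neg h1, if_neg h2, if_neg h3, if_pos h4]
            simp [pvSweep]
            exact IH _ (by simp; omega)
          · -- default: no token is a prefix of c :: t
            rw [pvScan, if_neg h1, if_neg h2, if_neg h3, if_neg h4]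
            rw [pvSweep, if_neg h1]
            have pres1 := pvSweep_prefix_iff ['N','e','h','?'] ['!','='] (by simp) (by simp) t.length t
            have e2 : List.isPrefixOf ['m','e','h','?'] (c :: pvSweep ['N','e','h','?'] ['!','='] t) = false := by
              by_contra hcon
              obtain ⟨hcm, hpre⟩ : 'm' = c ∧ ['e','h','?'] <+: pvSweep ['N','e','h','?'] ['!','='] t := by
                simpa using hcon
              obtain ⟨s', hs'⟩ := (pres1 ['e','h','?'] le_rfl (by simp) (by simp)).mp hpre
              exact h2 ((List.isPrefixOf_iff_prefix).mpr ⟨s', by rw [← hcm, ← hs']; rfl⟩)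
            rw [pvSweep, if_neg (by simp [e2])]
            have pres2 := fun q h1 h2 => pvSweep_prefix_iff ['m','e','h','?'] ['<'] (by simp) (by simp)
              (pvSweep ['N','e','h','?'] ['!','='] t).length (pvSweep ['N','e','h','?'] ['!','='] t) q le_rfl h1 h2
            have e3 : List.isPrefixOf ['M','e','h','?']
                (c :: pvSweep ['m','e','h','?'] ['<'] (pvSweep ['N','e','h','?'] ['!','='] t)) = false := by
              by_contra hcon
              obtain ⟨hcm, hpre⟩ : 'M' = c ∧ ['e','h','?'] <+: pvSweep ['m','e','h','?'] ['<']
                  (pvSweep ['N','e','h','?'] ['!','='] t) := by simpa using hcon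
              obtain ⟨s', hs'⟩ := (pres1 ['e','h','?'] le_rfl (by simp) (by simp)).mp
                ((pres2 ['e','h','?'] (by simp) (by simp)).mp hpre)
              exact h3 ((List.isPrefixOf_iff_prefix).mpr ⟨s', by rw [← hcm, ← hs']; rfl⟩)
            rw [pvSweep, if_neg (by simp [e3])]
            have pres3 := fun q h1 h2 => pvSweep_prefix_iff ['M','e','h','?'] ['>'] (by simp) (by simp)
              (pvSweep ['m','e','h','?'] ['<'] (pvSweep ['N','e','h','?'] ['!','='] t)).length
              (pvSweep ['m','e','h','?'] ['<'] (pvSweep ['N','e','h','?'] ['!','='] t)) q le_rfl h1 h2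
            have e4 : List.isPrefixOf ['e','h','?']
                (c :: pvSweep ['M','e','h','?'] ['>'] (pvSweep ['m','e','h','?'] ['<']
                  (pvSweep ['N','e','h','?'] ['!','='] t))) = false := by
              by_contra hcon
              obtain ⟨hcm, hpre⟩ : 'e' = c ∧ ['h','?'] <+: pvSweep ['M','e','h','?'] ['>']
                  (pvSweep ['m','e','h','?'] ['<'] (pvSweep ['N','e','h','?'] ['!','='] t)) := by
                simpa using hcon
              obtain ⟨s', hs'⟩ := (pres1 ['h','?'] le_rfl (by simp) (by simp)).mp
                ((pres2 ['h','?'] (by simp) (by simp)).mp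
                  ((pres3 ['h','?'] (by simp) (by simp)).mp hpre))
              exact h4 ((List.isPrefixOf_iff_prefix).mpr ⟨s', by rw [← hcm, ← hs']; rfl⟩)
            rw [pvSweep, if_neg (by simp [e4])]
            rw [IH t le_rfl]

theorem replace_operators_eq (s : String) :
    replace_operators s = replace_operators_alt s := by
  have hA : replace_operators s =
      PySem.Str.replace (PySem.Str.replace (PySem.Str.replace
        (PySem.Str.replace s "Neh?" "!=") "meh?" "<") "Meh?" ">") "eh?" "==" := rfl
  rw [hA]
  simp only [PySem.Str.replace, String.toList_ofList]
  rw [pvReplace_eq_sweep _ _ _ (by decide), pvReplace_eq_sweep _ _ _ (by decide),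
      pvReplace_eq_sweep _ _ _ (by decide), pvReplace_eq_sweep _ _ _ (by decide)]
  rw [replace_operators_alt]
  congr 1
  exact pvChain_eq_scan_fuel s.toList.length s.toList le_rfl

-- ===== VERDICT (by name: the statement is the Claim_ definition above) =====
theorem replace_operators_spec : Claim_equal_replace_operators := by
  intro condition _
  unfold Spec_replace_operators
  exact replace_operators_eq condition
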